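-- pv_equiv track=rewrite | github.com/dantetemplar/competitive-programming | Codeforces - Educational Codeforces Round 182 (Rated for Div. 2)/D_Ценники.py | solve
-- ===== SOURCE A (Python) =====
-- def solve(n, y, C):
--     M = max(C) + 1
--     prefixes = [0] * (M + 1)
--     for c in C:
--         prefixes[c] += 1
--     for i in range(1, M + 1):
--         prefixes[i] += prefixes[i - 1]
--
--     answer = -n * y
--     for i in range(2, M + 1):
--         current = -n * y
--         for j in range(1, M // i + 2):
--             matched = prefixes[min(j * i, M)] - prefixes[(j - 1) * i]
--             count = prefixes[j] - prefixes[j - 1]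
--             current += y * min(count, matched) + j * matched
--         answer = max(answer, current)
--     return answer
-- ===== SOURCE B (Python) =====
-- def solve(n, y, C):
--     M = max(C) + 1
--     freq = [0] * (M + 1)
--     for c in C:
--         freq[c] += 1
--     support = [(k, f) for k, f in enumerate(freq) if f > 0]
--     answer = -n * y
--     for i in range(2, M + 1):
--         current = -n * y
--         for j in range(1, M // i + 2):
--             lo = (j - 1) * i
--             hi = min(j * i, M)
--             matched = sum(f for k, f in support if lo < k <= hi)
--             count = sum(f for k, f in support if k == j)
--             current += y * min(count, matched) + j * matched
--         answer = max(answer, current)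
--     return answer
-- ===== Notes on version B (the rewrite author's own statement) =====
-- stated objective: alternative
-- what changed: B drops A's cumulative prefix-sum array and O(1) range queries: it compresses the frequency table to its list of nonzero (value, count) pairs once and answers every block's matched/count query by scanning that short support list directly.
import Mathlib
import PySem

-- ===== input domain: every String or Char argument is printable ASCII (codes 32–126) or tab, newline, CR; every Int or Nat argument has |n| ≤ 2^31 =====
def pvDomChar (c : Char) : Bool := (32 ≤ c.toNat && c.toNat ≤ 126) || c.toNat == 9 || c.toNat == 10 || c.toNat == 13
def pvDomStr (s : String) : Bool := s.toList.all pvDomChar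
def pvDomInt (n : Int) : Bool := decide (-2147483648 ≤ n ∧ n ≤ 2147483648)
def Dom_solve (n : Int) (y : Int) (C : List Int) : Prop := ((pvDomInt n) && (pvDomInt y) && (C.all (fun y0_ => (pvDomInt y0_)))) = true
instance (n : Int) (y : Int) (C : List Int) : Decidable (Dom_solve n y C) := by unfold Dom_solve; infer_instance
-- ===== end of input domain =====

-- B replaces A's precomputed prefix-sum array by a frequency array scanned block by block
-- inside the inner loop (objective: alternative decomposition, not faster).

-- ===== PORT A =====
def solve (n : Int) (y : Int) (C : List Int) : Int :=
  match PySem.List.max? C (fun x => x) with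
  | none => 0   -- max(C) raises ValueError on empty C; excluded by Pre_solve
  | some mx =>
    let M : Int := mx + 1
    let prefixes0 : List Int := PySem.List.pyRepeat [(0 : Int)] (M + 1)
    let prefixes1 : List Int :=
      C.foldl (fun p c => PySem.List.pySetD p c (PySem.List.pyGetD p c 0 + 1)) prefixes0
    let prefixes : List Int :=
      (PySem.List.pyRange 1 (M + 1) 1).foldl
        (fun p i => PySem.List.pySetD p i (PySem.List.pyGetD p i 0 + PySem.List.pyGetD p (i - 1) 0))
        prefixes1
    (PySem.List.pyRange 2 (M + 1) 1).foldl
      (fun answer i =>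
        max answer
          ((PySem.List.pyRange 1 (PySem.Int.floordiv M i + 2) 1).foldl
            (fun current j =>
              let matched : Int :=
                PySem.List.pyGetD prefixes (min (j * i) M) 0 -
                  PySem.List.pyGetD prefixes ((j - 1) * i) 0
              let count : Int :=
                PySem.List.pyGetD prefixes j 0 - PySem.List.pyGetD prefixes (j - 1) 0
              current + y * min count matched + j * matched)
            (-n * y)))
      (-n * y)

-- ===== PORT B =====
def solve_alt (n : Int) (y : Int) (C : List Int) : Int :=
  match PySem.List.max? C (fun x => x) with
  | none => 0   -- max(C) raises ValueError on empty C; excluded by Pre_solve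
  | some mx =>
    let M : Int := mx + 1
    let freq : List Int :=
      C.foldl (fun p c => PySem.List.pySetD p c (PySem.List.pyGetD p c 0 + 1))
        (PySem.List.pyRepeat [(0 : Int)] (M + 1))
    let support : List (Int × Int) :=
      (PySem.List.enumerate freq 0).filter (fun kf => decide (0 < kf.2))
    (PySem.List.pyRange 2 (M + 1) 1).foldl
      (fun answer i =>
        max answer
          ((PySem.List.pyRange 1 (PySem.Int.floordiv M i + 2) 1).foldl
            (fun current j =>
              let lo : Int := (j - 1) * i
              let hi : Int := min (j * i) M
              let matched : Int :=
                ((support.filter (fun kf => decide (lo < kf.1) && decide (kf.1 ≤ hi))).map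
                  (fun kf => kf.2)).sum
              let count : Int :=
                ((support.filter (fun kf => kf.1 == j)).map (fun kf => kf.2)).sum
              current + y * min count matched + j * matched)
            (-n * y)))
      (-n * y)

-- ===== PRECONDITION & SPEC =====
-- Pre_solve excludes exactly the inputs where Python A raises: the empty list (max() raises
-- ValueError) and lists containing some c < -(max(C)+2) (prefixes[c] raises IndexError).
def Pre_solve (n : Int) (y : Int) (C : List Int) : Prop :=
  C ≠ [] ∧ ∀ c ∈ C, ∃ m ∈ C, -(m + 2) ≤ c
instance (n : Int) (y : Int) (C : List Int) : Decidable (Pre_solve n y C) := by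
  unfold Pre_solve; infer_instance

def pvWitness_solve : Int × Int × List Int := (3, 2, [1, 4, 1, 2])

def Spec_solve (n : Int) (y : Int) (C : List Int) (out : Int) : Prop := out = solve_alt n y C
instance (n : Int) (y : Int) (C : List Int) (out : Int) : Decidable (Spec_solve n y C out) := by
  unfold Spec_solve; infer_instance

-- ===== CLAIM (what is proved, stated in full; the proofs are below) =====
def Claim_equal_solve : Prop := ∀ (n : Int) (y : Int) (C : List Int), Dom_solve n y C → Pre_solve n y C → Spec_solve n y C (solve n y C)

-- ===== LEMMAS AND PROOFS =====

-- proof-side names for the two fold steps appearing in the ports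
def pvCntStep (p : List Int) (c : Int) : List Int :=
  PySem.List.pySetD p c (PySem.List.pyGetD p c 0 + 1)

def pvCumStep (q : List Int) (i : Int) : List Int :=
  PySem.List.pySetD q i (PySem.List.pyGetD q i 0 + PySem.List.pyGetD q (i - 1) 0)

-- the count-building loop keeps the length of the array
theorem pvCnt_length (C : List Int) (p : List Int) :
    (C.foldl pvCntStep p).length = p.length := by
  induction C generalizing p with
  | nil => rfl
  | cons c t ih => simp [List.foldl_cons, ih, pvCntStep, PySem.List.length_pySetD]

-- one more element of a take, as a sum
theorem pv_take_succ_sum (p : List Int) (k : Nat) (hk : k < p.length) :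
    (p.take (k+1)).sum = (p.take k).sum + p.getD k 0 := by
  rw [List.take_add_one, List.sum_append, List.getD_eq_getElem p 0 hk]
  simp [List.getElem?_eq_getElem hk]

-- invariant of the in-place prefix-sum loop: cells 0..u hold prefix sums, the rest is untouched
theorem pvCum_inv (p : List Int) (u : Nat) (hu : u < p.length) :
    ((PySem.List.pyRange 1 ((u:Int)+1) 1).foldl pvCumStep p).length = p.length ∧
    ∀ k : Nat, k < p.length →
      ((PySem.List.pyRange 1 ((u:Int)+1) 1).foldl pvCumStep p).getD k 0 =
        if k ≤ u then (p.take (k+1)).sum else p.getD k 0 := by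
  induction u with
  | zero =>
    rw [PySem.List.pyRange_one_eq_nil (by norm_num)]
    refine ⟨rfl, fun k hk => ?_⟩
    rcases Nat.eq_zero_or_pos k with h0 | h0
    · subst h0
      simp [pv_take_succ_sum p 0 hk]
    · have h1 : ¬ k ≤ 0 := by omega
      simp [h1]
  | succ u ih =>
    have hu' : u < p.length := Nat.lt_of_succ_lt hu
    obtain ⟨hlen, hval⟩ := ih hu'
    have hsplit : PySem.List.pyRange 1 ((u:Int)+1+1) 1 =
        PySem.List.pyRange 1 ((u:Int)+1) 1 ++ [(u:Int)+1] :=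
      PySem.List.pyRange_one_succ_right (by omega)
    push_cast
    rw [hsplit, List.foldl_append, List.foldl_cons, List.foldl_nil]
    set q := (PySem.List.pyRange 1 ((u:Int)+1) 1).foldl pvCumStep p with hq
    have hcast : ((u:Int)+1) = ((u+1 : Nat) : Int) := by push_cast; ring
    have hget1 : PySem.List.pyGetD q ((u:Int)+1) 0 = p.getD (u+1) 0 := by
      rw [hcast, PySem.List.pyGetD_natCast, hval (u+1) hu]
      simp
    have hget0 : PySem.List.pyGetD q ((u:Int)+1-1) 0 = (p.take (u+1)).sum := by
      have : ((u:Int)+1-1) = ((u : Nat) : Int) := by ring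
      rw [this, PySem.List.pyGetD_natCast, hval u hu']
      simp
    have hstep : pvCumStep q ((u:Int)+1) =
        q.set (u+1) (p.getD (u+1) 0 + (p.take (u+1)).sum) := by
      rw [pvCumStep, hget1, hget0, hcast, PySem.List.pySetD_natCast]
    rw [hstep]
    refine ⟨by simp [hlen], fun k hk => ?_⟩
    have hkq : k < q.length := by omega
    rw [List.getD_eq_getElem _ 0 (by simp [hlen]; omega), List.getElem_set]
    by_cases hke : u + 1 = k
    · subst hke
      rw [if_pos rfl, if_pos le_rfl, pv_take_succ_sum p (u+1) hu]
      ring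
    · rw [if_neg hke, ← List.getD_eq_getElem q 0 hkq, hval k hk]
      by_cases hku : k ≤ u
      · rw [if_pos hku, if_pos (by omega)]
      · rw [if_neg hku, if_neg (by omega)]

-- a block sum of array cells equals a difference of takes
theorem pv_sum_range_getD (p : List Int) (a b : Int) (ha : 0 ≤ a) (hab : a ≤ b)
    (hb : b ≤ (p.length : Int)) :
    ((PySem.List.pyRange a b 1).map (fun k => PySem.List.pyGetD p k 0)).sum =
      (p.take b.toNat).sum - (p.take a.toNat).sum := by
  induction b, hab using Int.le_induction with
  | base => rw [PySem.List.pyRange_one_eq_nil le_rfl]; simp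
  | succ b hab ih =>
    have hb' : b < (p.length : Int) := by omega
    rw [PySem.List.pyRange_one_succ_right (by omega), List.map_append, List.sum_append,
      ih (by omega)]
    have hbt : (b+1).toNat = b.toNat + 1 := by omega
    have hblen : b.toNat < p.length := by omega
    have hgb : PySem.List.pyGetD p b 0 = p.getD b.toNat 0 := by
      have : b = ((b.toNat : Nat) : Int) := by omega
      rw [this, PySem.List.pyGetD_natCast]
      simp only [List.getD]
      have hmx : (max b 0).toNat = b.toNat := by omega
      simp [hmx]
    rw [hbt, pv_take_succ_sum p b.toNat hblen]
    simp [hgb]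
    ring

-- every element of a pySetD result is the written value or an old element
theorem pvSetD_mem (p : List Int) (i v : Int) (x : Int)
    (hx : x ∈ PySem.List.pySetD p i v) : x = v ∨ x ∈ p := by
  unfold PySem.List.pySetD PySem.List.pySet? at hx
  cases h : PySem.List.pyIdx? p.length i with
  | none => rw [h] at hx; right; exact hx
  | some k =>
    rw [h] at hx
    simp only [Option.map_some, Option.getD_some] at hx
    rcases List.mem_or_eq_of_mem_set hx with h2 | h2
    · right; exact h2
    · left; exact h2

-- the count-building loop keeps all cells nonnegative
theorem pvCnt_nonneg (C : List Int) (p : List Int) (hp : ∀ x ∈ p, 0 ≤ x) :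
    ∀ x ∈ C.foldl pvCntStep p, 0 ≤ x := by
  induction C generalizing p with
  | nil => exact hp
  | cons c t ih =>
    intro x hx
    refine ih (pvCntStep p c) ?_ x hx
    intro z hz
    rcases pvSetD_mem p c _ z hz with h | h
    · have h0 : 0 ≤ PySem.List.pyGetD p c 0 := by
        by_cases hr : PySem.Raise.InRange p.length c
        · exact hp _ (PySem.List.pyGetD_mem p 0 hr)
        · rw [PySem.List.pyGetD_of_none p c 0 ((PySem.List.pyGet?_eq_none_iff p c).mpr hr)]
      omega
    · exact hp _ h

-- summing the second components of a filtered list, as an if-sum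
theorem pv_filter_map_sum (l : List (Int × Int)) (q : Int × Int → Bool) :
    ((l.filter q).map (fun kf => kf.2)).sum = (l.map (fun kf => if q kf then kf.2 else 0)).sum := by
  induction l with
  | nil => rfl
  | cons x t ih =>
    by_cases h : q x
    · simp [h, ih]
    · simp [h, ih]

-- a window query on the nonzero support equals the if-sum over all cell indices
theorem pv_support_sum (p : List Int) (hpos : ∀ x ∈ p, 0 ≤ x) (W : Int → Bool) :
    ((((PySem.List.enumerate p 0).filter (fun kf => decide (0 < kf.2))).filter
        (fun kf => W kf.1)).map (fun kf => kf.2)).sum =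
      ((PySem.List.pyRange 0 (p.length : Int) 1).map
        (fun k => if W k then PySem.List.pyGetD p k 0 else 0)).sum := by
  rw [List.filter_filter, pv_filter_map_sum, PySem.List.enumerate_eq_map_pyRange p 0,
    List.map_map]
  simp only [PySem.List.len_eq]
  congr 1
  apply List.map_congr_left
  intro k hk
  rw [PySem.List.mem_pyRange_one] at hk
  have hkl : k < (p.length : Int) := by simpa using hk.2
  have hf : 0 ≤ PySem.List.pyGetD p k 0 := by
    refine hpos _ (PySem.List.pyGetD_mem p 0 ?_)
    constructor
    · omega
    · omega
  simp only [Function.comp]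
  by_cases hw : W k
  · by_cases h0 : 0 < PySem.List.pyGetD p k 0
    · simp [hw, h0]
    · have : PySem.List.pyGetD p k 0 = 0 := by omega
      simp [hw, this]
  · simp [hw]

-- window (lo, hi] on the support = the straight range sum of the cells
theorem pv_support_window (p : List Int) (hpos : ∀ x ∈ p, 0 ≤ x) (lo hi : Int)
    (h0 : 0 ≤ lo) (hlh : lo ≤ hi) (hhi : hi < (p.length : Int)) :
    ((((PySem.List.enumerate p 0).filter (fun kf => decide (0 < kf.2))).filter
        (fun kf => decide (lo < kf.1) && decide (kf.1 ≤ hi))).map (fun kf => kf.2)).sum =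
      ((PySem.List.pyRange (lo + 1) (hi + 1) 1).map (fun k => PySem.List.pyGetD p k 0)).sum := by
  rw [pv_support_sum p hpos (fun k => decide (lo < k) && decide (k ≤ hi))]
  rw [PySem.List.pyRange_one_append 0 (lo + 1) (p.length : Int) (by omega) (by omega),
    PySem.List.pyRange_one_append (lo + 1) (hi + 1) (p.length : Int) (by omega) (by omega)]
  simp only [List.map_append, List.sum_append]
  have h1 : ((PySem.List.pyRange 0 (lo + 1) 1).map
      (fun k => if decide (lo < k) && decide (k ≤ hi) then PySem.List.pyGetD p k 0 else 0)).sum = 0 := by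
    apply List.sum_eq_zero
    intro x hx
    simp only [List.mem_map] at hx
    obtain ⟨k, hk, rfl⟩ := hx
    rw [PySem.List.mem_pyRange_one] at hk
    have : ¬ (lo < k) := by omega
    simp [this]
  have h3 : ((PySem.List.pyRange (hi + 1) (p.length : Int) 1).map
      (fun k => if decide (lo < k) && decide (k ≤ hi) then PySem.List.pyGetD p k 0 else 0)).sum = 0 := by
    apply List.sum_eq_zero
    intro x hx
    simp only [List.mem_map] at hx
    obtain ⟨k, hk, rfl⟩ := hx
    rw [PySem.List.mem_pyRange_one] at hk
    have : ¬ (k ≤ hi) := by omega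
    simp [this]
  have h2 : ((PySem.List.pyRange (lo + 1) (hi + 1) 1).map
      (fun k => if decide (lo < k) && decide (k ≤ hi) then PySem.List.pyGetD p k 0 else 0)) =
      ((PySem.List.pyRange (lo + 1) (hi + 1) 1).map (fun k => PySem.List.pyGetD p k 0)) := by
    apply List.map_congr_left
    intro k hk
    rw [PySem.List.mem_pyRange_one] at hk
    have ha : lo < k := by omega
    have hb : k ≤ hi := by omega
    simp [ha, hb]
  rw [h1, h3, h2]
  ring

-- a point query on the support = the single cell
theorem pv_support_at (p : List Int) (hpos : ∀ x ∈ p, 0 ≤ x) (j : Int)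
    (h0 : 0 ≤ j) (hj : j < (p.length : Int)) :
    ((((PySem.List.enumerate p 0).filter (fun kf => decide (0 < kf.2))).filter
        (fun kf => kf.1 == j)).map (fun kf => kf.2)).sum = PySem.List.pyGetD p j 0 := by
  rw [pv_support_sum p hpos (fun k => k == j)]
  rw [PySem.List.pyRange_one_append 0 j (p.length : Int) (by omega) (by omega),
    PySem.List.pyRange_one_append j (j + 1) (p.length : Int) (by omega) (by omega),
    PySem.List.pyRange_one_singleton]
  simp only [List.map_append, List.sum_append]
  have h1 : ((PySem.List.pyRange 0 j 1).map
      (fun k => if (k == j : Bool) then PySem.List.pyGetD p k 0 else 0)).sum = 0 := by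
    apply List.sum_eq_zero
    intro x hx
    simp only [List.mem_map] at hx
    obtain ⟨k, hk, rfl⟩ := hx
    rw [PySem.List.mem_pyRange_one] at hk
    have : ¬ (k = j) := by omega
    simp [this]
  have h3 : ((PySem.List.pyRange (j + 1) (p.length : Int) 1).map
      (fun k => if (k == j : Bool) then PySem.List.pyGetD p k 0 else 0)).sum = 0 := by
    apply List.sum_eq_zero
    intro x hx
    simp only [List.mem_map] at hx
    obtain ⟨k, hk, rfl⟩ := hx
    rw [PySem.List.mem_pyRange_one] at hk
    have : ¬ (k = j) := by omega
    simp [this]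
  rw [h1, h3]
  simp

-- reading one cell of the prefix-sum array
theorem pvP_getD (p : List Int) (M : Int) (hM0 : 0 ≤ M) (hlen : (p.length : Int) = M + 1)
    (t : Int) (h0 : 0 ≤ t) (htM : t ≤ M) :
    PySem.List.pyGetD ((PySem.List.pyRange 1 (M+1) 1).foldl pvCumStep p) t 0 =
      (p.take (t.toNat + 1)).sum := by
  have hM1 : M + 1 = ((M.toNat : Nat) : Int) + 1 := by omega
  rw [hM1]
  obtain ⟨hl, hv⟩ := pvCum_inv p M.toNat (by omega)
  have ht : t = ((t.toNat : Nat) : Int) := by omega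
  rw [ht, PySem.List.pyGetD_natCast, hv t.toNat (by omega), if_pos (by omega)]
  have hmx : (max t 0).toNat = t.toNat := by omega
  simp [hmx]

-- the per-term equality inside the two inner loops
theorem pv_inner_term (p : List Int) (M y i j : Int) (hM0 : 2 ≤ M)
    (hlen : (p.length : Int) = M + 1) (hpos : ∀ x ∈ p, 0 ≤ x) (hi : 2 ≤ i ∧ i < M + 1)
    (hj : 1 ≤ j ∧ j < PySem.Int.floordiv M i + 2) (cur : Int) :
    cur + y * min (PySem.List.pyGetD ((PySem.List.pyRange 1 (M+1) 1).foldl pvCumStep p) j 0 -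
          PySem.List.pyGetD ((PySem.List.pyRange 1 (M+1) 1).foldl pvCumStep p) (j - 1) 0)
        (PySem.List.pyGetD ((PySem.List.pyRange 1 (M+1) 1).foldl pvCumStep p) (min (j * i) M) 0 -
          PySem.List.pyGetD ((PySem.List.pyRange 1 (M+1) 1).foldl pvCumStep p) ((j - 1) * i) 0) +
        j * (PySem.List.pyGetD ((PySem.List.pyRange 1 (M+1) 1).foldl pvCumStep p) (min (j * i) M) 0 -
          PySem.List.pyGetD ((PySem.List.pyRange 1 (M+1) 1).foldl pvCumStep p) ((j - 1) * i) 0) =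
    cur + y * min
        (((((PySem.List.enumerate p 0).filter (fun kf => decide (0 < kf.2))).filter
            (fun kf => kf.1 == j)).map (fun kf => kf.2)).sum)
        (((((PySem.List.enumerate p 0).filter (fun kf => decide (0 < kf.2))).filter
            (fun kf => decide ((j - 1) * i < kf.1) && decide (kf.1 ≤ min (j * i) M))).map
            (fun kf => kf.2)).sum) +
        j * (((((PySem.List.enumerate p 0).filter (fun kf => decide (0 < kf.2))).filter
            (fun kf => decide ((j - 1) * i < kf.1) && decide (kf.1 ≤ min (j * i) M))).map
            (fun kf => kf.2)).sum) := by
  obtain ⟨hi2, hiM⟩ := hi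
  obtain ⟨hj1, hj2⟩ := hj
  rw [PySem.Int.floordiv_eq_ediv_of_pos (by omega)] at hj2
  -- arithmetic bounds on the block
  have hdm := Int.mul_ediv_add_emod M i
  have hmod : 0 ≤ M % i := Int.emod_nonneg M (by omega)
  have hq0 : 0 ≤ M / i := Int.ediv_nonneg (by omega) (by omega)
  have hqi : (M / i) * i ≤ M := by nlinarith [hdm, hmod]
  have hloM : (j - 1) * i ≤ M :=
    le_trans (mul_le_mul_of_nonneg_right (by omega) (by omega)) hqi
  have h2q : 2 * (M / i) ≤ M := by nlinarith [hqi, hq0, hi2]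
  have hjM : j ≤ M := by
    by_cases h : M / i ≤ 0
    · linarith
    · linarith
  have hlo0 : 0 ≤ (j - 1) * i := mul_nonneg (by omega) (by omega)
  have hhi : (j - 1) * i ≤ min (j * i) M := by
    refine le_min ?_ hloM
    exact mul_le_mul_of_nonneg_right (by omega) (by omega)
  have hhiM : min (j * i) M ≤ M := min_le_right _ _
  have hhi0 : 0 ≤ min (j * i) M := le_trans hlo0 hhi
  -- the four prefix-array reads
  have hPj := pvP_getD p M (by omega) hlen j (by omega) hjM
  have hPj1 := pvP_getD p M (by omega) hlen (j - 1) (by omega) (by omega)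
  have hPhi := pvP_getD p M (by omega) hlen (min (j * i) M) hhi0 hhiM
  have hPlo := pvP_getD p M (by omega) hlen ((j - 1) * i) hlo0 hloM
  rw [hPj, hPj1, hPhi, hPlo]
  -- count: prefix difference at consecutive cells = one cell = B's point query
  have hjn : (j - 1).toNat + 1 = j.toNat := by omega
  have hjlen : j.toNat < p.length := by omega
  have hcount : (p.take (j.toNat + 1)).sum - (p.take ((j - 1).toNat + 1)).sum =
      PySem.List.pyGetD p j 0 := by
    rw [hjn, pv_take_succ_sum p j.toNat hjlen]
    have hjc : j = ((j.toNat : Nat) : Int) := by omega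
    rw [hjc, PySem.List.pyGetD_natCast]
    have hmx : (max j 0).toNat = j.toNat := by omega
    simp [List.getD, hmx]
  have hcountB := pv_support_at p hpos j (by omega) (by omega)
  -- matched: B's support window = the same prefix difference
  have hmatched : (((((PySem.List.enumerate p 0).filter (fun kf => decide (0 < kf.2))).filter
      (fun kf => decide ((j - 1) * i < kf.1) && decide (kf.1 ≤ min (j * i) M))).map
      (fun kf => kf.2)).sum) =
      (p.take ((min (j * i) M).toNat + 1)).sum - (p.take (((j - 1) * i).toNat + 1)).sum := by
    rw [pv_support_window p hpos ((j - 1) * i) (min (j * i) M) hlo0 hhi (by omega)]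
    rw [pv_sum_range_getD p ((j - 1) * i + 1) (min (j * i) M + 1) (by omega) (by omega) (by omega)]
    have h1 : (min (j * i) M + 1).toNat = (min (j * i) M).toNat + 1 := by omega
    have h2 : ((j - 1) * i + 1).toNat = ((j - 1) * i).toNat + 1 := by omega
    rw [h1, h2]
  rw [hcountB, hcount, hmatched]

-- ===== VERDICT (by name: the statement is the Claim_ definition above) =====
theorem solve_spec : Claim_equal_solve := by
  intro n y C _ _
  unfold Spec_solve solve solve_alt
  cases hC : PySem.List.max? C (fun x => x) with
  | none => rfl
  | some mx =>
    simp only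
    set M : Int := mx + 1 with hMdef
    set p : List Int :=
      C.foldl (fun p c => PySem.List.pySetD p c (PySem.List.pyGetD p c 0 + 1))
        (PySem.List.pyRepeat [(0 : Int)] (M + 1)) with hp
    by_cases hM2 : M + 1 ≤ 2
    · rw [PySem.List.pyRange_one_eq_nil hM2]
      rfl
    · have hM : 2 ≤ M := by omega
      have hlen : (p.length : Int) = M + 1 := by
        have h1 : (C.foldl (fun p c => PySem.List.pySetD p c (PySem.List.pyGetD p c 0 + 1))
            (PySem.List.pyRepeat [(0 : Int)] (M + 1))).length =
            (PySem.List.pyRepeat [(0 : Int)] (M + 1)).length := pvCnt_length C _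
        rw [hp, h1, PySem.List.pyRepeat_singleton, List.length_replicate]
        omega
      have hpos : ∀ x ∈ p, 0 ≤ x := by
        refine pvCnt_nonneg C _ ?_
        intro x hx
        rw [PySem.List.pyRepeat_singleton, List.mem_replicate] at hx
        omega
      apply PySem.List.foldl_congr_mem'
      intro i hi acc
      rw [PySem.List.mem_pyRange_one] at hi
      congr 1
      apply PySem.List.foldl_congr_mem'
      intro j hj cur
      rw [PySem.List.mem_pyRange_one] at hj
      exact pv_inner_term p M y i j hM hlen hpos hi hj cur
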